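-- pv_equiv track=rewrite | github.com/Muhammad-Shaheersudocmbck/Codeforces-Solutions | Codeforces/1850/E_Cardboard_for_Pictures_371325536.py | idk
-- ===== SOURCE A (Python) =====
-- def check(mid, arr, a, b):
--     ans = 0
--     for i in arr:
--         val = i + (mid + mid)
--         ans += val * val
--         if ans > b:
--             return False
--     return True
--
-- def idk(arr, a, b):
--     l, r = 1, 10**18
--     ans = -1
--     while l <= r:
--         mid = l + (r - l) // 2
--         if check(mid, arr, a, b):
--             ans = mid
--             l = mid + 1
--         else:
--             r = mid - 1
--     return ans
-- ===== SOURCE B (Python) =====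
-- def idk(arr, a, b):
--     # Precompute n, sum, sum of squares once, so each binary-search probe is O(1):
--     # sum((i + t)**2 for i in arr) == n*t*t + 2*s*t + q  with t = 2*mid.
--     n = len(arr)
--     s = sum(arr)
--     q = sum(i * i for i in arr)
--     lo, hi = 1, 10**18
--     best = -1
--     while lo <= hi:
--         mid = (lo + hi) // 2
--         t = mid + mid
--         if n * t * t + 2 * s * t + q <= b:
--             best = mid
--             lo = mid + 1
--         else:
--             hi = mid - 1
--     return best
-- ===== Notes on version B (the rewrite author's own statement) =====
-- stated objective: alternative
-- what changed: Precomputes n, sum(arr) and sum of squares once and tests each binary-search midpoint with the O(1) closed-form quadratic n*t^2+2*s*t+q <= b instead of A's per-probe rescan of arr (A's early exit often makes that rescan cheap in practice, so this is a structural change, not a measured speed-up).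
-- outside the precondition, e.g. on idk([], 0, -1): A returns 1000000000000000000, B returns -1
import Mathlib
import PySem

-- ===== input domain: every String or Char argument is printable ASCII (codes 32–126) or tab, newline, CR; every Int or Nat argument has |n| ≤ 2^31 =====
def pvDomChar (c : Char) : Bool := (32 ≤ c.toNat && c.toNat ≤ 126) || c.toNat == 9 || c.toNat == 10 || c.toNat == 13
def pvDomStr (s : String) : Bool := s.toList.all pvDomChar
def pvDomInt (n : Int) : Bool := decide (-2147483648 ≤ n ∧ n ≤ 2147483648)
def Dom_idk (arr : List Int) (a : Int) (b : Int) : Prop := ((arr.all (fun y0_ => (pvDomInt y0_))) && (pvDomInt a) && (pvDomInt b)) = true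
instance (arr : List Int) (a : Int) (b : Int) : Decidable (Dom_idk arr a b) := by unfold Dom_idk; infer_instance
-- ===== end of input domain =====

-- B tests each binary-search midpoint with a closed-form quadratic on precomputed n, Σarr, Σarr²
-- instead of A's per-probe rescan of arr; same probe sequence, so the return value is identical on Pre_.
-- Both while-loops run for at most 61 iterations (the search interval [1, 10^18] at least halves
-- each step), so each is transcribed as structural recursion on a fuel of 200 that never runs out.

-- ===== PORT A =====
-- A's check: accumulate Σ (i + 2*mid)^2 with early False once the partial sum exceeds b.
def checkGo (mid : Int) (b : Int) : List Int → Int → Bool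
  | [], _ => true
  | i :: t, ans =>
      let val := i + (mid + mid)
      let ans' := ans + val * val
      if ans' > b then false else checkGo mid b t ans'

def check (mid : Int) (arr : List Int) (a : Int) (b : Int) : Bool :=
  checkGo mid b arr 0

-- A's while-loop: binary search on [l, r], recording the last mid with check true.
def idkGo (arr : List Int) (a : Int) (b : Int) : Nat → Int → Int → Int → Int
  | 0, _, _, ans => ans
  | fuel + 1, l, r, ans =>
      if l ≤ r then
        let mid := l + PySem.Int.floordiv (r - l) 2
        if check mid arr a b then idkGo arr a b fuel (mid + 1) r mid
        else idkGo arr a b fuel l (mid - 1) ans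
      else ans

def idk (arr : List Int) (a : Int) (b : Int) : Int :=
  idkGo arr a b 200 1 (10 ^ 18) (-1)

-- ===== PORT B =====
-- B's while-loop: same search interval, O(1) quadratic test per probe.
def altGo (n : Int) (s : Int) (q : Int) (b : Int) : Nat → Int → Int → Int → Int
  | 0, _, _, best => best
  | fuel + 1, lo, hi, best =>
      if lo ≤ hi then
        let mid := PySem.Int.floordiv (lo + hi) 2
        let t := mid + mid
        if n * t * t + 2 * s * t + q ≤ b then altGo n s q b fuel (mid + 1) hi mid
        else altGo n s q b fuel lo (mid - 1) best
      else best

def idk_alt (arr : List Int) (a : Int) (b : Int) : Int :=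
  let n : Int := arr.length
  let s : Int := arr.sum
  let q : Int := (arr.map (fun i => i * i)).sum
  altGo n s q b 200 1 (10 ^ 18) (-1)

-- ===== PRECONDITION & SPEC =====
-- Pre_ excludes only (arr = [] with b < 0), where A's and B's answers are both defensible readings
-- of an empty picture list with a negative cardboard budget: A's check is vacuously True so A
-- returns 10^18, while B's total-area test 0 ≤ b fails so B returns -1.
def Pre_idk (arr : List Int) (a : Int) (b : Int) : Prop := arr ≠ [] ∨ 0 ≤ b
instance (arr : List Int) (a : Int) (b : Int) : Decidable (Pre_idk arr a b) := by
  unfold Pre_idk; infer_instance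

def pvWitness_idk : List Int × Int × Int := ([1], 1, 20)

def Spec_idk (arr : List Int) (a : Int) (b : Int) (out : Int) : Prop := out = idk_alt arr a b
instance (arr : List Int) (a : Int) (b : Int) (out : Int) : Decidable (Spec_idk arr a b out) := by
  unfold Spec_idk; infer_instance

-- ===== CLAIM (what is proved, stated in full; the proofs are below) =====
def Claim_equal_idk : Prop := ∀ (arr : List Int) (a : Int) (b : Int), Dom_idk arr a b → Pre_idk arr a b → Spec_idk arr a b (idk arr a b)

-- ===== LEMMAS AND PROOFS =====

-- the two midpoint formulas agree
theorem pv_mid_eq (l r : Int) :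
    l + PySem.Int.floordiv (r - l) 2 = PySem.Int.floordiv (l + r) 2 := by
  rw [PySem.Int.floordiv_eq_ediv_of_pos (by norm_num : (0:Int) < 2),
      PySem.Int.floordiv_eq_ediv_of_pos (by norm_num : (0:Int) < 2)]
  omega

theorem pv_sumsq_nonneg (c : Int) (l : List Int) :
    0 ≤ (l.map (fun i => (i + c) * (i + c))).sum := by
  apply List.sum_nonneg
  intro x hx
  rcases List.mem_map.mp hx with ⟨i, _, rfl⟩
  exact mul_self_nonneg _

-- A's early-exit accumulation equals a test of the total sum (vacuously true on [])
theorem pv_checkGo_iff (mid b : Int) (l : List Int) (ans : Int) :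
    checkGo mid b l ans = true ↔
      (l = [] ∨ ans + (l.map (fun i => (i + (mid + mid)) * (i + (mid + mid)))).sum ≤ b) := by
  induction l generalizing ans with
  | nil => simp [checkGo]
  | cons i t ih =>
      simp only [checkGo, List.map_cons, List.sum_cons]
      by_cases h : ans + (i + (mid + mid)) * (i + (mid + mid)) > b
      · have ht := pv_sumsq_nonneg (mid + mid) t
        simp only [if_pos h]
        constructor
        · intro hc; exact absurd hc (by simp)
        · rintro (hc | hc)
          · exact absurd hc (by simp)
          · omega
      · simp only [if_neg h, ih]
        constructor
        · rintro (rfl | hc)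
          · right; simpa using not_lt.mp h
          · right; omega
        · rintro (hc | hc)
          · exact absurd hc (by simp)
          · right; omega

-- the quadratic closed form of the total sum
theorem pv_sum_closed (t : Int) (l : List Int) :
    (l.map (fun i => (i + t) * (i + t))).sum =
      (l.length : Int) * t * t + 2 * l.sum * t + (l.map (fun i => i * i)).sum := by
  induction l with
  | nil => simp
  | cons i tl ih =>
      simp only [List.map_cons, List.sum_cons, List.length_cons, List.sum_cons, ih]
      push_cast
      ring

-- A's boolean test coincides with B's quadratic test on Pre_
theorem pv_cond_eq (arr : List Int) (a b : Int) (hpre : Pre_idk arr a b) (mid : Int) :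
    (check mid arr a b = true) ↔
      ((arr.length : Int) * (mid + mid) * (mid + mid) + 2 * arr.sum * (mid + mid)
        + (arr.map (fun i => i * i)).sum ≤ b) := by
  rw [check, pv_checkGo_iff, ← pv_sum_closed]
  rcases eq_or_ne arr [] with rfl | hne
  · rcases hpre with h | h
    · exact absurd rfl h
    · simpa using h
  · simp [hne]

theorem pv_go_eq (arr : List Int) (a b : Int) (hpre : Pre_idk arr a b) :
    ∀ (fuel : Nat) (l r ans : Int), idkGo arr a b fuel l r ans =
      altGo (arr.length : Int) arr.sum ((arr.map (fun i => i * i)).sum) b fuel l r ans := by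
  intro fuel
  induction fuel with
  | zero => intro l r ans; rfl
  | succ fuel ih =>
      intro l r ans
      simp only [idkGo, altGo, ← pv_mid_eq l r]
      by_cases h : l ≤ r
      · simp only [if_pos h]
        by_cases hc : check (l + PySem.Int.floordiv (r - l) 2) arr a b = true
        · rw [if_pos hc, if_pos ((pv_cond_eq arr a b hpre _).mp hc), ih]
        · rw [if_neg (by simpa using hc),
              if_neg (fun hq => hc ((pv_cond_eq arr a b hpre _).mpr hq)), ih]
      · simp [if_neg h]

-- ===== VERDICT (by name: the statement is the Claim_ definition above) =====
theorem idk_spec : Claim_equal_idk := by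
  intro arr a b _ hpre
  unfold Spec_idk idk idk_alt
  exact pv_go_eq arr a b hpre 200 1 (10 ^ 18) (-1)
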